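-- pv_equiv track=rewrite | github.com/luciaicull/algorithm_study | sw_test/2117.py | num_home
-- ===== SOURCE A (Python) =====
-- def num_home(center_x, center_y, MAP, k):
--     num = 0
--     for delta_x in range(k):
--         up_x = center_x-delta_x
--         down_x = center_x+delta_x
--         for y in range(center_y-k+1+delta_x, center_y+k-delta_x):
--             if up_x >= 0 and up_x< len(MAP) and y >= 0 and y < len(MAP):
--                 num += MAP[up_x][y]
--             if down_x >= 0 and down_x< len(MAP) and y >= 0 and y < len(MAP) and delta_x != 0:
--                 num += MAP[down_x][y]
--     return num
-- ===== SOURCE B (Python) =====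
-- def num_home(center_x, center_y, MAP, k):
--     n = len(MAP)
--     total = 0
--     for x in range(max(0, center_x - k + 1), min(n, center_x + k)):
--         rem = k - 1 - abs(x - center_x)
--         lo = max(0, center_y - rem)
--         hi = min(n, center_y + rem + 1)
--         if lo < hi:
--             total += sum(MAP[x][lo:hi])
--     return total
-- ===== Notes on version B (the rewrite author's own statement) =====
-- stated objective: faster
-- what changed: B replaces A's per-cell bounds-checked accumulation over paired up/down rows by row-interval arithmetic: the diamond's row range and each row's column interval are clipped to [0,n) with max/min and sum(row[lo:hi]) is added per row, so off-grid cells are never visited and no per-cell bounds test remains.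
import Mathlib
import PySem

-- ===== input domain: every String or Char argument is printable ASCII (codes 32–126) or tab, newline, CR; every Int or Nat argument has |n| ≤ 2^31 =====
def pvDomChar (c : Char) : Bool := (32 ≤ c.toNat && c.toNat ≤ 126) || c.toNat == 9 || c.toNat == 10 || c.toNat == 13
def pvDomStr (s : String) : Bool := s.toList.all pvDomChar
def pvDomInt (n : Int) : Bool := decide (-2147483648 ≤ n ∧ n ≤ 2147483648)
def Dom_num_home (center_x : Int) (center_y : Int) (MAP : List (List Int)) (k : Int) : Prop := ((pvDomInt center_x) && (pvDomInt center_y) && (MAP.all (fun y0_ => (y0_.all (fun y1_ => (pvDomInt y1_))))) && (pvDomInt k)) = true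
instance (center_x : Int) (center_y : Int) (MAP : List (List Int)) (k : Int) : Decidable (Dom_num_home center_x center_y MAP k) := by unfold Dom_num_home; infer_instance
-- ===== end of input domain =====

-- B replaces A's per-cell bounds-checked accumulation over paired up/down rows by
-- row-interval arithmetic: row range and column intervals are clipped to the grid and each
-- row contributes the sum of one slice, so off-grid diamond cells are never visited (faster).

-- ===== PORT A =====
def num_home (center_x : Int) (center_y : Int) (MAP : List (List Int)) (k : Int) : Int :=
  (PySem.List.pyRange 0 k 1).foldl (fun num delta_x =>
    let up_x := center_x - delta_x
    let down_x := center_x + delta_x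
    (PySem.List.pyRange (center_y - k + 1 + delta_x) (center_y + k - delta_x) 1).foldl
      (fun num y =>
        let num := if up_x ≥ 0 ∧ up_x < (MAP.length : Int) ∧ y ≥ 0 ∧ y < (MAP.length : Int)
          then num + PySem.List.pyGetD (PySem.List.pyGetD MAP up_x []) y 0 else num
        if down_x ≥ 0 ∧ down_x < (MAP.length : Int) ∧ y ≥ 0 ∧ y < (MAP.length : Int) ∧ delta_x ≠ 0
          then num + PySem.List.pyGetD (PySem.List.pyGetD MAP down_x []) y 0 else num) num) 0

-- ===== PORT B =====
def num_home_alt (center_x : Int) (center_y : Int) (MAP : List (List Int)) (k : Int) : Int :=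
  let n : Int := (MAP.length : Int)
  (PySem.List.pyRange (max 0 (center_x - k + 1)) (min n (center_x + k)) 1).foldl
    (fun total x =>
      let rem := k - 1 - |x - center_x|
      let lo := max 0 (center_y - rem)
      let hi := min n (center_y + rem + 1)
      if lo < hi
        then total + (PySem.List.slice (PySem.List.pyGetD MAP x []) (some lo) (some hi)).sum
        else total) 0

-- ===== PRECONDITION & SPEC =====
-- Pre_ excludes exactly the inputs on which A raises IndexError: grids where some cell of the
-- diamond that lies inside the n×n square (n = len(MAP), A's column bound) falls beyond the
-- end of its (shorter) row.
def Pre_num_home (center_x : Int) (center_y : Int) (MAP : List (List Int)) (k : Int) : Prop :=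
  ∀ i < MAP.length, ∀ j < MAP.length,
    |(i : Int) - center_x| + |(j : Int) - center_y| < k → j < (MAP.getD i []).length
instance (center_x : Int) (center_y : Int) (MAP : List (List Int)) (k : Int) : Decidable (Pre_num_home center_x center_y MAP k) := by unfold Pre_num_home; infer_instance

def pvWitness_num_home : Int × Int × List (List Int) × Int := (1, 1, [[1, 2, 3], [4, 5, 6], [7, 8, 9]], 2)

def Spec_num_home (center_x : Int) (center_y : Int) (MAP : List (List Int)) (k : Int) (out : Int) : Prop := out = num_home_alt center_x center_y MAP k
instance (center_x : Int) (center_y : Int) (MAP : List (List Int)) (k : Int) (out : Int) : Decidable (Spec_num_home center_x center_y MAP k out) := by unfold Spec_num_home; infer_instance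

-- ===== CLAIM (what is proved, stated in full; the proofs are below) =====
def Claim_equal_num_home : Prop := ∀ (center_x : Int) (center_y : Int) (MAP : List (List Int)) (k : Int), Dom_num_home center_x center_y MAP k → Pre_num_home center_x center_y MAP k → Spec_num_home center_x center_y MAP k (num_home center_x center_y MAP k)

-- ===== LEMMAS AND PROOFS =====

-- cell value with A's bound test (column bound = grid height)
def pvG (MAP : List (List Int)) (x y : Int) : Int :=
  if 0 ≤ x ∧ x < (MAP.length : Int) ∧ 0 ≤ y ∧ y < (MAP.length : Int)
    then PySem.List.pyGetD (PySem.List.pyGetD MAP x []) y 0 else 0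

-- guarded sum of row x over columns [lo, hi)
def pvS (MAP : List (List Int)) (x lo hi : Int) : Int :=
  ((PySem.List.pyRange lo hi 1).map (pvG MAP x)).sum

lemma pvShift (f : Int → Int) (c a b : Int) :
    ((PySem.List.pyRange a b 1).map (fun t => f (c + t))).sum
      = ((PySem.List.pyRange (c + a) (c + b) 1).map f).sum := by
  rw [PySem.List.pyRange_one a b, PySem.List.pyRange_one (c + a) (c + b)]
  simp only [List.map_map]
  have hb : (c + b - (c + a)) = b - a := by ring
  rw [hb]
  congr 1
  apply List.map_congr_left
  intro x _
  simp [Function.comp]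
  ring_nf

lemma pvInnerA (MAP : List (List Int)) (up down dx lo hi a : Int) :
    (PySem.List.pyRange lo hi 1).foldl
      (fun num y =>
        let num := if up ≥ 0 ∧ up < (MAP.length : Int) ∧ y ≥ 0 ∧ y < (MAP.length : Int)
          then num + PySem.List.pyGetD (PySem.List.pyGetD MAP up []) y 0 else num
        if down ≥ 0 ∧ down < (MAP.length : Int) ∧ y ≥ 0 ∧ y < (MAP.length : Int) ∧ dx ≠ 0
          then num + PySem.List.pyGetD (PySem.List.pyGetD MAP down []) y 0 else num) a
    = a + (pvS MAP up lo hi + if dx = 0 then 0 else pvS MAP down lo hi) := by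
  rw [PySem.List.foldl_congr_mem
      (g := fun num y => num + (pvG MAP up y + if dx = 0 then 0 else pvG MAP down y))]
  · rw [PySem.List.foldl_add]
    unfold pvS
    congr 1
    by_cases h : dx = 0 <;> simp [h]
  · intro acc y _
    unfold pvG
    by_cases h : dx = 0 <;> split_ifs <;> simp_all <;> omega

-- the range-folding identity: Σ_{d=-m..m} F d = Σ_{dx=0..m} (F (-dx) + [dx≠0] F dx)
lemma pvFold (F : Int → Int) (m : Nat) :
    ((PySem.List.pyRange (-(m : Int)) ((m : Int) + 1) 1).map F).sum
      = ((PySem.List.pyRange 0 ((m : Int) + 1) 1).map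
          (fun dx => F (-dx) + if dx = 0 then 0 else F dx)).sum := by
  induction m with
  | zero => norm_num [PySem.List.pyRange_one]
  | succ m ih =>
    have h2 : (0 : Int) ≤ (m : Int) + 1 := by omega
    have h3 : -((m : Int) + 1) ≤ (m : Int) + 1 := by omega
    push_cast
    rw [show ((m : Int) + 1 + 1) = ((m : Int) + 1) + 1 by ring,
        PySem.List.pyRange_one_succ_right h3,
        PySem.List.pyRange_one_cons (show -((m : Int) + 1) < (m : Int) + 1 by omega),
        show -((m : Int) + 1) + 1 = -(m : Int) by ring,
        PySem.List.pyRange_one_succ_right h2]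
    simp only [List.map_append, List.map_cons, List.sum_append, List.sum_cons,
      List.map_nil, List.sum_nil]
    rw [ih]
    have hm1 : ((m : Int) + 1) ≠ 0 := by omega
    simp [hm1]
    ring

lemma num_home_eq_sum (cx cy : Int) (MAP : List (List Int)) (k : Int) :
    num_home cx cy MAP k
      = ((PySem.List.pyRange 0 k 1).map
          (fun dx => pvS MAP (cx - dx) (cy - k + 1 + dx) (cy + k - dx)
            + if dx = 0 then 0 else pvS MAP (cx + dx) (cy - k + 1 + dx) (cy + k - dx))).sum := by
  unfold num_home
  rw [PySem.List.foldl_congr_mem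
      (g := fun num dx => num + (pvS MAP (cx - dx) (cy - k + 1 + dx) (cy + k - dx)
            + if dx = 0 then 0 else pvS MAP (cx + dx) (cy - k + 1 + dx) (cy + k - dx)))]
  · rw [PySem.List.foldl_add]; ring
  · intro acc dx _
    exact pvInnerA MAP (cx - dx) (cx + dx) dx _ _ acc

-- A as one sum over the diamond's rows x ∈ [cx-(k-1), cx+k)
lemma num_home_eq_F (cx cy : Int) (MAP : List (List Int)) (k : Int) :
    num_home cx cy MAP k
      = ((PySem.List.pyRange (cx - k + 1) (cx + k) 1).map
          (fun x => pvS MAP x (cy - (k - 1 - |x - cx|)) (cy + (k - 1 - |x - cx|) + 1))).sum := by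
  rw [num_home_eq_sum]
  by_cases hk : k ≤ 0
  · rw [PySem.List.pyRange_one_eq_nil hk, PySem.List.pyRange_one_eq_nil (by omega)]
    simp
  · push_neg at hk
    set m : Nat := (k - 1).toNat with hm
    have hk1 : k = (m : Int) + 1 := by omega
    have hF := pvFold (fun d => pvS MAP (cx + d) (cy - (k - 1 - |d|)) (cy + (k - 1 - |d|) + 1)) m
    have hsh := pvShift (fun x => pvS MAP x (cy - (k - 1 - |x - cx|)) (cy + (k - 1 - |x - cx|) + 1))
      cx (-(m : Int)) ((m : Int) + 1)
    rw [show cx + -(m : Int) = cx - k + 1 by omega, show cx + ((m : Int) + 1) = cx + k by omega] at hsh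
    rw [← hsh]
    have hLHS : ((PySem.List.pyRange (-(m : Int)) ((m : Int) + 1) 1).map
        (fun t => pvS MAP (cx + t) (cy - (k - 1 - |cx + t - cx|)) (cy + (k - 1 - |cx + t - cx|) + 1))).sum
        = ((PySem.List.pyRange (-(m : Int)) ((m : Int) + 1) 1).map
            (fun d => pvS MAP (cx + d) (cy - (k - 1 - |d|)) (cy + (k - 1 - |d|) + 1))).sum := by
      congr 1; apply List.map_congr_left; intro t _
      rw [show cx + t - cx = t by ring]
    rw [hLHS, hF]
    rw [show ((m : Int) + 1) = k from hk1.symm]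
    apply congrArg
    apply List.map_congr_left
    intro dx hdx
    rw [PySem.List.mem_pyRange_one] at hdx
    have habs : |(-dx)| = dx := by rw [abs_neg]; exact abs_of_nonneg hdx.1
    have habs2 : |dx| = dx := abs_of_nonneg hdx.1
    rw [habs, habs2]
    have e1 : cx + -dx = cx - dx := by ring
    have e2 : cy - (k - 1 - dx) = cy - k + 1 + dx := by ring
    have e3 : cy + (k - 1 - dx) + 1 = cy + k - dx := by ring
    rw [e1, e2, e3]

lemma pvS_zero_of_x (MAP : List (List Int)) (x lo hi : Int)
    (h : x < 0 ∨ (MAP.length : Int) ≤ x) : pvS MAP x lo hi = 0 := by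
  unfold pvS
  apply List.sum_eq_zero
  intro v hv
  rcases List.mem_map.1 hv with ⟨y, _, rfl⟩
  unfold pvG
  rw [if_neg]
  rintro ⟨h1, h2, -, -⟩
  omega

lemma pvS_zero_of_clip_empty (MAP : List (List Int)) (x lo hi : Int)
    (h : min (MAP.length : Int) hi ≤ max 0 lo) : pvS MAP x lo hi = 0 := by
  unfold pvS
  apply List.sum_eq_zero
  intro v hv
  rcases List.mem_map.1 hv with ⟨y, hy, rfl⟩
  rw [PySem.List.mem_pyRange_one] at hy
  unfold pvG
  rw [if_neg]
  rintro ⟨-, -, h3, h4⟩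
  have h5 : max 0 lo ≤ y := by omega
  have h6 : y < min (MAP.length : Int) hi := by omega
  omega

-- a sum over a range clips to [0, n) when the summand vanishes outside it
lemma pvSumClip (F : Int → Int) (a b n : Int)
    (h0 : ∀ x, x < 0 → F x = 0) (hn : ∀ x, n ≤ x → F x = 0) :
    ((PySem.List.pyRange a b 1).map F).sum
      = ((PySem.List.pyRange (max 0 a) (min n b) 1).map F).sum := by
  by_cases h : max 0 a ≤ min n b
  · rw [PySem.List.pyRange_one_append a (max 0 a) b (le_max_right 0 a)
        (le_trans h (min_le_right n b)),
      PySem.List.pyRange_one_append (max 0 a) (min n b) b h (min_le_right n b)]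
    simp only [List.map_append, List.sum_append]
    have z1 : ((PySem.List.pyRange a (max 0 a) 1).map F).sum = 0 := by
      apply List.sum_eq_zero; intro v hv
      rcases List.mem_map.1 hv with ⟨y, hy, rfl⟩
      rw [PySem.List.mem_pyRange_one] at hy
      exact h0 y (by omega)
    have z2 : ((PySem.List.pyRange (min n b) b 1).map F).sum = 0 := by
      apply List.sum_eq_zero; intro v hv
      rcases List.mem_map.1 hv with ⟨y, hy, rfl⟩
      rw [PySem.List.mem_pyRange_one] at hy
      exact hn y (by omega)
    rw [z1, z2]; ring
  · push_neg at h
    rw [PySem.List.pyRange_one_eq_nil (le_of_lt h)]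
    simp only [List.map_nil, List.sum_nil]
    apply List.sum_eq_zero; intro v hv
    rcases List.mem_map.1 hv with ⟨y, hy, rfl⟩
    rw [PySem.List.mem_pyRange_one] at hy
    rcases lt_or_ge y 0 with hy0 | hy0
    · exact h0 y hy0
    · exact hn y (by omega)

-- sum of a take-of-drop as a guarded-index range sum
lemma pvSliceSum (row : List Int) (lo m : Nat) (h : lo + m ≤ row.length) :
    ((row.drop lo).take m).sum
      = ((PySem.List.pyRange (lo : Int) ((lo : Int) + (m : Int)) 1).map
          (fun y => PySem.List.pyGetD row y 0)).sum := by
  induction m generalizing lo with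
  | zero =>
    simp [PySem.List.pyRange_one_eq_nil (by omega : ((lo : Int) + (0:Nat) ≤ (lo : Int)))]
  | succ m ih =>
    have hlt : lo < row.length := by omega
    rw [List.drop_eq_getElem_cons hlt]
    rw [List.take_succ_cons, List.sum_cons]
    rw [PySem.List.pyRange_one_cons (by push_cast; omega)]
    simp only [List.map_cons, List.sum_cons]
    have h1 : PySem.List.pyGetD row (lo : Int) 0 = row[lo] := by
      rw [PySem.List.pyGetD_natCast, List.getD_eq_getElem _ _ hlt]
    rw [h1]
    have h2 := ih (lo + 1) (by omega)
    have hc : ((lo : Int) + 1) + (m : Int) = (lo : Int) + ((m : Nat) + 1 : Nat) := by push_cast; ring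
    rw [show (((lo + 1 : Nat)) : Int) = (lo : Int) + 1 by push_cast; ring] at h2
    rw [← hc, ← h2]

-- under the row-length hypothesis, the guarded row sum is the clipped slice's sum
lemma pvS_eq_slice (MAP : List (List Int)) (x lo hi : Int)
    (hx0 : 0 ≤ x) (hxn : x < (MAP.length : Int))
    (hne : max 0 lo < min (MAP.length : Int) hi)
    (hrow : ∀ y : Int, max 0 lo ≤ y → y < min (MAP.length : Int) hi →
      y < ((PySem.List.pyGetD MAP x []).length : Int)) :
    pvS MAP x lo hi
      = (PySem.List.slice (PySem.List.pyGetD MAP x [])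
          (some (max 0 lo)) (some (min (MAP.length : Int) hi))).sum := by
  set row := PySem.List.pyGetD MAP x [] with hrowdef
  set l := max 0 lo with hl
  set h' := min (MAP.length : Int) hi with hh
  have hl0 : 0 ≤ l := le_max_left 0 lo
  have hlol : lo ≤ l := le_max_right 0 lo
  have hh'hi : h' ≤ hi := min_le_right _ _
  have hlh : l ≤ h' := le_of_lt hne
  -- split the raw column range at l and h'
  unfold pvS
  rw [PySem.List.pyRange_one_append lo l hi hlol (le_trans hlh hh'hi),
      PySem.List.pyRange_one_append l h' hi hlh hh'hi]
  simp only [List.map_append, List.sum_append]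
  have z1 : ((PySem.List.pyRange lo l 1).map (pvG MAP x)).sum = 0 := by
    apply List.sum_eq_zero; intro v hv
    rcases List.mem_map.1 hv with ⟨y, hy, rfl⟩
    rw [PySem.List.mem_pyRange_one] at hy
    unfold pvG
    rw [if_neg]; rintro ⟨-, -, hy0, -⟩; omega
  have z2 : ((PySem.List.pyRange h' hi 1).map (pvG MAP x)).sum = 0 := by
    apply List.sum_eq_zero; intro v hv
    rcases List.mem_map.1 hv with ⟨y, hy, rfl⟩
    rw [PySem.List.mem_pyRange_one] at hy
    unfold pvG
    rw [if_neg]; rintro ⟨-, -, -, hyn⟩; omega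
  rw [z1, z2]
  -- the middle part: every guard holds, so it is the plain row sum
  have hmid : ((PySem.List.pyRange l h' 1).map (pvG MAP x)).sum
      = ((PySem.List.pyRange l h' 1).map (fun y => PySem.List.pyGetD row y 0)).sum := by
    congr 1
    apply List.map_congr_left
    intro y hy
    rw [PySem.List.mem_pyRange_one] at hy
    unfold pvG
    rw [if_pos ⟨hx0, hxn, by omega, by omega⟩]
  rw [hmid]
  -- switch to natural-number bounds and use the slice characterisation
  have hlen : h' ≤ (row.length : Int) := by
    have := hrow (h' - 1) (by omega) (by omega)
    omega
  have hlnat : l = ((l.toNat : Nat) : Int) := (Int.toNat_of_nonneg hl0).symm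
  have hh'nat : h' = ((h'.toNat : Nat) : Int) := (Int.toNat_of_nonneg (le_trans hl0 hlh)).symm
  rw [hlnat, hh'nat, PySem.List.slice_natCast]
  have hm : (h'.toNat : Int) = (l.toNat : Int) + ((h'.toNat - l.toNat : Nat) : Int) := by
    push_cast; omega
  rw [hm]
  rw [← pvSliceSum row l.toNat (h'.toNat - l.toNat) (by omega)]
  simp

-- B as the clipped-row sum of the same per-row quantity
lemma num_home_alt_eq_sum (cx cy : Int) (MAP : List (List Int)) (k : Int) :
    num_home_alt cx cy MAP k
      = ((PySem.List.pyRange (max 0 (cx - k + 1)) (min (MAP.length : Int) (cx + k)) 1).map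
          (fun x =>
            if max 0 (cy - (k - 1 - |x - cx|)) < min (MAP.length : Int) (cy + (k - 1 - |x - cx|) + 1)
              then (PySem.List.slice (PySem.List.pyGetD MAP x [])
                (some (max 0 (cy - (k - 1 - |x - cx|))))
                (some (min (MAP.length : Int) (cy + (k - 1 - |x - cx|) + 1)))).sum
              else 0)).sum := by
  unfold num_home_alt
  rw [PySem.List.foldl_congr_mem
      (g := fun total x => total +
        (if max 0 (cy - (k - 1 - |x - cx|)) < min (MAP.length : Int) (cy + (k - 1 - |x - cx|) + 1)
          then (PySem.List.slice (PySem.List.pyGetD MAP x [])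
            (some (max 0 (cy - (k - 1 - |x - cx|))))
            (some (min (MAP.length : Int) (cy + (k - 1 - |x - cx|) + 1)))).sum
          else 0))]
  · rw [PySem.List.foldl_add]; ring
  · intro acc x _
    dsimp only
    split_ifs <;> ring

-- ===== VERDICT (by name: the statement is the Claim_ definition above) =====
theorem num_home_spec : Claim_equal_num_home := by
  intro cx cy MAP k _ hpre
  unfold Spec_num_home
  rw [num_home_eq_F, num_home_alt_eq_sum]
  set n : Int := (MAP.length : Int) with hn
  set F : Int → Int := fun x => pvS MAP x (cy - (k - 1 - |x - cx|)) (cy + (k - 1 - |x - cx|) + 1)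
    with hF
  rw [pvSumClip F (cx - k + 1) (cx + k) n
      (fun x hx => pvS_zero_of_x MAP x _ _ (Or.inl hx))
      (fun x hx => pvS_zero_of_x MAP x _ _ (Or.inr hx))]
  apply congrArg
  apply List.map_congr_left
  intro x hx
  rw [PySem.List.mem_pyRange_one] at hx
  have hx0 : 0 ≤ x := le_trans (le_max_left 0 _) hx.1
  have hxn : x < n := lt_of_lt_of_le hx.2 (min_le_left n _)
  by_cases hc : max 0 (cy - (k - 1 - |x - cx|)) < min n (cy + (k - 1 - |x - cx|) + 1)
  · rw [if_pos hc, hF]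
    apply pvS_eq_slice MAP x _ _ hx0 hxn hc
    intro y hy1 hy2
    have hy0 : 0 ≤ y := le_trans (le_max_left 0 _) hy1
    have hyn : y < n := lt_of_lt_of_le hy2 (min_le_left n _)
    have hxcx : x - cx ≤ |x - cx| := le_abs_self _
    have hxcx2 : -(x - cx) ≤ |x - cx| := neg_le_abs _
    have hdiam : |x - cx| + |y - cy| < k := by
      have hy3 : cy - (k - 1 - |x - cx|) ≤ y := le_trans (le_max_right 0 _) hy1
      have hy4 : y < cy + (k - 1 - |x - cx|) + 1 := lt_of_lt_of_le hy2 (min_le_right n _)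
      rcases abs_cases (y - cy) with ⟨he, -⟩ | ⟨he, -⟩ <;> omega
    have hp := hpre x.toNat (by omega) y.toNat (by omega)
    rw [Int.toNat_of_nonneg hx0, Int.toNat_of_nonneg hy0] at hp
    have hp2 := hp hdiam
    have hrowe : PySem.List.pyGetD MAP x [] = MAP.getD x.toNat [] := by
      rw [show x = ((x.toNat : Nat) : Int) from (Int.toNat_of_nonneg hx0).symm,
        PySem.List.pyGetD_natCast, Int.toNat_natCast]
    rw [hrowe]
    omega
  · rw [if_neg hc, hF]
    exact pvS_zero_of_clip_empty MAP x _ _ (le_of_not_gt hc)
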